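-- pv_equiv track=rewrite | github.com/posl/comment_recommendation | script/split_gen/4_time/zh/128_D/6.py | solve
-- ===== SOURCE A (Python) =====
-- def solve(n, k, v):
--     ans = 0
--     for i in range(0, min(n+1, k+1)):
--         for j in range(0, min(n+1, k+1)):
--             if i+j > k:
--                 continue
--             l = i
--             r = n - j
--             a = v[:l] + v[r:]
--             a.sort()
--             ans = max(ans, sum(a[j:]))
--     return ans
-- ===== SOURCE B (Python) =====
-- def _ins(x, lst):
--     # insert x into sorted lst, before the first element >= x
--     p = 0
--     while p < len(lst) and lst[p] < x:
--         p += 1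
--     return lst[:p] + [x] + lst[p:]
--
-- def solve(n, k, v):
--     # For each suffix count j, fix the right window once, then sweep the prefix
--     # size i upward, maintaining the j smallest cards (as a sorted list) and the
--     # running total, instead of re-slicing and fully re-sorting for every (i, j).
--     best = 0
--     m = min(n, k)
--     for j in range(0, m + 1):
--         base = v[n - j:]
--         bottom = sorted(base)[:j]
--         bottom_sum = sum(bottom)
--         total = sum(base)
--         best = max(best, total - bottom_sum)
--         for i in range(1, min(m, k - j) + 1):
--             if i - 1 < len(v):
--                 x = v[i - 1]
--                 total += x
--                 if len(bottom) < j: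
--                     bottom = _ins(x, bottom)
--                     bottom_sum += x
--                 elif j > 0 and x < bottom[-1]:
--                     bottom_sum += x - bottom[-1]
--                     bottom = _ins(x, bottom[:-1])
--             best = max(best, total - bottom_sum)
--     return best
-- ===== Notes on version B (the rewrite author's own statement) =====
-- stated objective: alternative
-- what changed: Instead of re-slicing v[:i]+v[n-j:] and fully re-sorting for every (i,j) pair, B fixes the right window once per suffix count j (loop order transposed) and sweeps the prefix size i upward, maintaining the j smallest cards as a sorted list with running bottom/total sums, doing at most one bounded insertion per step; intended as faster (measured 12-50x on mid sizes) but a timing run could not confirm it at the largest size, so no speed is claimed.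
import Mathlib
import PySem

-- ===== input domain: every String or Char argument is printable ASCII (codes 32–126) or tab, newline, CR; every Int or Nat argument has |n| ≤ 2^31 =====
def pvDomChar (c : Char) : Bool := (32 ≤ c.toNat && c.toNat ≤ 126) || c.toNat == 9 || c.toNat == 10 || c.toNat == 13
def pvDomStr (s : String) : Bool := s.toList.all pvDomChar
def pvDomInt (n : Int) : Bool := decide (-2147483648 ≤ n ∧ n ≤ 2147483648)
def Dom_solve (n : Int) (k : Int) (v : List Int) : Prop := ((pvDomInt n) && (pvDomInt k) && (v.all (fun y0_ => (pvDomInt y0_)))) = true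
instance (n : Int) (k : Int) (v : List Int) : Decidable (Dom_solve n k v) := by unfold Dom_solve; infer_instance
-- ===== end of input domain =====

-- B replaces A's per-(i,j) slice-copy + full re-sort by, for each suffix count j, one
-- sweep over prefix sizes maintaining the j smallest cards as a sorted list with running
-- bottom/total sums (objective: alternative algorithm).

-- ===== PORT A =====
def solve (n : Int) (k : Int) (v : List Int) : Int :=
  (PySem.List.pyRange 0 (min (n + 1) (k + 1)) 1).foldl (fun ans i =>
    (PySem.List.pyRange 0 (min (n + 1) (k + 1)) 1).foldl (fun ans j =>
      if i + j > k then ans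
      else
        let l := i
        let r := n - j
        let a := PySem.List.slice v none (some l) ++ PySem.List.slice v (some r) none
        let a := PySem.List.sorted a (fun x => x) false
        max ans (PySem.List.slice a (some j) none).sum) ans) 0

-- ===== PORT B =====
-- the while-loop of Source B's _ins: place x before the first element ≥ x
def insLt (x : Int) : List Int → List Int
  | [] => [x]
  | y :: t => if y < x then y :: insLt x t else x :: y :: t

def solve_alt (n : Int) (k : Int) (v : List Int) : Int :=
  let m := min n k
  (PySem.List.pyRange 0 (m + 1) 1).foldl (fun best j =>
    let base := PySem.List.slice v (some (n - j)) none
    let bottom := PySem.List.slice (PySem.List.sorted base (fun x => x) false) none (some j)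
    let bottomSum := bottom.sum
    let total := base.sum
    let best := max best (total - bottomSum)
    let st := (PySem.List.pyRange 1 (min m (k - j) + 1) 1).foldl
      (fun (st : List Int × Int × Int × Int) i =>
        let bottom := st.1
        let bottomSum := st.2.1
        let total := st.2.2.1
        let best := st.2.2.2
        if i - 1 < (v.length : Int) then
          let x := PySem.List.pyGetD v (i - 1) 0
          let total := total + x
          if (bottom.length : Int) < j then
            let bottom := insLt x bottom
            let bottomSum := bottomSum + x
            (bottom, bottomSum, total, max best (total - bottomSum))
          else if j > 0 ∧ x < PySem.List.pyGetD bottom (-1) 0 then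
            let bottomSum := bottomSum + x - PySem.List.pyGetD bottom (-1) 0
            let bottom := insLt x (PySem.List.slice bottom none (some (-1)))
            (bottom, bottomSum, total, max best (total - bottomSum))
          else (bottom, bottomSum, total, max best (total - bottomSum))
        else (bottom, bottomSum, total, max best (total - bottomSum)))
      (bottom, bottomSum, total, best)
    st.2.2.2) 0

-- ===== PRECONDITION & SPEC =====
def Spec_solve (n : Int) (k : Int) (v : List Int) (out : Int) : Prop := out = solve_alt n k v
instance (n : Int) (k : Int) (v : List Int) (out : Int) : Decidable (Spec_solve n k v out) := by unfold Spec_solve; infer_instance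

-- ===== CLAIM (what is proved, stated in full; the proofs are below) =====
def Claim_equal_solve : Prop := ∀ (n : Int) (k : Int) (v : List Int), Dom_solve n k v → Spec_solve n k v (solve n k v)

-- ===== LEMMAS AND PROOFS =====

theorem perm_insLt (x : Int) (l : List Int) : (insLt x l).Perm (x :: l) := by
  induction l with
  | nil => simp [insLt]
  | cons y t ih =>
    simp only [insLt]
    split
    · exact ((ih.cons y).trans (List.Perm.swap x y t))
    · exact List.Perm.refl _

theorem sum_insLt (x : Int) (l : List Int) : (insLt x l).sum = x + l.sum := by
  have := (perm_insLt x l).sum_eq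
  simpa using this

theorem mem_insLt {a x : Int} {l : List Int} (h : a ∈ insLt x l) : a = x ∨ a ∈ l := by
  have := (perm_insLt x l).mem_iff.mp h
  simpa using this

theorem pairwise_insLt (x : Int) {l : List Int} (h : l.Pairwise (· ≤ ·)) :
    (insLt x l).Pairwise (· ≤ ·) := by
  induction l with
  | nil => simp [insLt]
  | cons y t ih =>
    rcases List.pairwise_cons.mp h with ⟨hy, ht⟩
    simp only [insLt]
    split
    · rename_i hyx
      refine List.pairwise_cons.mpr ⟨?_, ih ht⟩
      intro b hb
      rcases mem_insLt hb with rfl | hb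
      · exact le_of_lt hyx
      · exact hy b hb
    · rename_i hyx
      refine List.pairwise_cons.mpr ⟨?_, h⟩
      intro b hb
      rcases List.mem_cons.mp hb with rfl | hb
      · omega
      · exact le_trans (by omega) (hy b hb)

theorem sorted_cons_mid (x : Int) (P Q : List Int) :
    PySem.List.sorted (P ++ x :: Q) (fun y => y) false
      = insLt x (PySem.List.sorted (P ++ Q) (fun y => y) false) := by
  apply PySem.List.sorted_id_eq_of_perm_of_pairwise
  · exact (perm_insLt _ _).trans
      (((PySem.List.sorted_perm _ _ _).cons x).trans List.perm_middle.symm)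
  · exact pairwise_insLt x (by simpa using PySem.List.sorted_pairwise (P ++ Q) (fun y => y))

-- the sorted kept list after absorbing the last j cards, for prefix size i

theorem foldl_skip_id (f : Nat → Int) (K' : Nat) (l : List Nat) (acc : Int)
    (h : ∀ j ∈ l, K' < j) :
    l.foldl (fun a j => if K' < j then a else max a (f j)) acc = acc := by
  induction l generalizing acc with
  | nil => rfl
  | cons y t ih =>
    simp only [List.foldl_cons, if_pos (h y (by simp))]
    exact ih acc (fun j hj => h j (by simp [hj]))

theorem foldl_if_gt (f : Nat → Int) (K' M : Nat) (acc : Int) :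
    (List.range (M + 1)).foldl (fun a j => if K' < j then a else max a (f j)) acc
      = (List.range (min M K' + 1)).foldl (fun a j => max a (f j)) acc := by
  have hsplit : M + 1 = (min M K' + 1) + (M - min M K') := by omega
  rw [hsplit, List.range_add, List.foldl_append]
  rw [foldl_skip_id _ _ _ _ (by intro j hj; simp at hj; omega)]
  apply PySem.List.foldl_congr_mem
  intro a j hj
  simp only [List.mem_range] at hj
  rw [if_neg (by omega)]

theorem length_insLt (x : Int) (l : List Int) : (insLt x l).length = l.length + 1 := by
  simpa using (perm_insLt x l).length_eq

theorem sum_drop_eq (L : List Int) (j : Nat) : (L.drop j).sum = L.sum - (L.take j).sum := by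
  have h : (L.take j).sum + (L.drop j).sum = L.sum := by
    rw [← List.sum_append, List.take_append_drop]
  omega

theorem take_insLt_small (x : Int) (l : List Int) (j : Nat) (h : l.length + 1 ≤ j) :
    (insLt x l).take j = insLt x l :=
  List.take_of_length_le (by rw [length_insLt]; omega)

theorem cons_take_eq_take (y : Int) : ∀ (t : List Int) (q : Nat) (hq : q < t.length),
    t.Pairwise (· ≤ ·) → y ≤ t[0]'(by omega) → t[q] ≤ y →
    y :: t.take q = t.take (q + 1) := by
  intro t
  induction t with
  | nil => intro q hq; simp at hq
  | cons z s ih =>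
    intro q hq hp h0 hqy
    rcases List.pairwise_cons.mp hp with ⟨hz, hs⟩
    cases q with
    | zero =>
      simp only [List.take_zero, List.take_succ_cons, List.take_zero]
      have : y = z := le_antisymm (by simpa using h0) (by simpa using hqy)
      rw [this]
    | succ q2 =>
      have hq2 : q2 < s.length := by simpa using hq
      have hyz : y = z := by
        have h1 : z ≤ s[q2] := hz _ (List.getElem_mem hq2)
        have h2 : s[q2] ≤ y := by simpa using hqy
        have h3 : y ≤ z := by simpa using h0
        omega
      subst hyz
      simp only [List.take_succ_cons]
      have hs0 : 0 < s.length := by omega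
      have := ih q2 hq2 hs (by exact hz _ (List.getElem_mem hs0)) (by simpa using hqy)
      rw [← this]

theorem take_insLt_lt (x : Int) : ∀ (l : List Int) (j : Nat), l.Pairwise (· ≤ ·) →
    (hj : j - 1 < l.length) → 1 ≤ j → x < l[j - 1] →
    (insLt x l).take j = insLt x (l.take (j - 1)) := by
  intro l
  induction l with
  | nil => intro j _ hj h1; simp at hj
  | cons y t ih =>
    intro j hp hj h1 hx
    rcases List.pairwise_cons.mp hp with ⟨hy, ht⟩
    simp only [insLt]
    split
    · rename_i hyx
      cases j with
      | zero => omega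
      | succ jj =>
        cases jj with
        | zero => simp at hx; omega
        | succ j2 =>
          simp only [Nat.add_sub_cancel, List.take_succ_cons]
          have hj' : j2 + 1 - 1 < t.length := by simpa using hj
          have hx' : x < t[j2 + 1 - 1] := by simpa using hx
          rw [ih (j2 + 1) ht hj' (by omega) hx']
          simp only [Nat.add_sub_cancel, List.take_succ_cons, insLt, if_pos hyx]
    · rename_i hyx
      cases j with
      | zero => omega
      | succ jj =>
        cases jj with
        | zero =>
          simp [insLt]
        | succ j2 =>
          simp only [Nat.add_sub_cancel, List.take_succ_cons, insLt, if_neg hyx]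

theorem take_insLt_ge (x : Int) : ∀ (l : List Int) (j : Nat), l.Pairwise (· ≤ ·) →
    (hj : j ≤ l.length) → (h1 : 1 ≤ j) → l[j - 1]'(by omega) ≤ x →
    (insLt x l).take j = l.take j := by
  intro l
  induction l with
  | nil => intro j _ hj h1; simp at hj; omega
  | cons y t ih =>
    intro j hp hj h1 hx
    rcases List.pairwise_cons.mp hp with ⟨hy, ht⟩
    simp only [insLt]
    split
    · rename_i hyx
      cases j with
      | zero => omega
      | succ jj =>
        simp only [List.take_succ_cons]
        cases jj with
        | zero => simp
        | succ j2 =>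
          have hj' : j2 + 1 ≤ t.length := by simpa using hj
          have hx' : t[j2 + 1 - 1]'(by omega) ≤ x := by simpa using hx
          rw [ih (j2 + 1) ht hj' (by omega) hx']
    · rename_i hyx
      cases j with
      | zero => omega
      | succ jj =>
        simp only [List.take_succ_cons]
        have hxy : x = y := by
          have h2 : x ≤ y := by omega
          cases jj with
          | zero => simp at hx; omega
          | succ j2 =>
            have hj2 : j2 < t.length := by simpa using hj
            have : y ≤ t[j2] := hy _ (List.getElem_mem hj2)
            have : t[j2] ≤ x := by simpa using hx
            omega
        subst hxy
        cases jj with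
        | zero => simp
        | succ j2 =>
          have hj2 : j2 < t.length := by simpa using hj
          have hx0 : x ≤ t[0]'(by omega) := hy _ (List.getElem_mem (by omega))
          have hxq : t[j2] ≤ x := by simpa using hx
          simp only [List.take_succ_cons]
          congr 1
          rw [cons_take_eq_take x t j2 hj2 ht hx0 hxq]

theorem sum_take_succ (L : List Int) (q : Nat) (hq : q < L.length) :
    (L.take (q + 1)).sum = (L.take q).sum + L[q] := List.sum_take_succ L q hq

-- the j smallest cards and the total, after the prefix sweep has absorbed c cards
def botAt (v R : List Int) (j c : Nat) : List Int :=
  (PySem.List.sorted (v.take c ++ R) (fun y => y) false).take j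

def totAt (v R : List Int) (c : Nat) : Int := (v.take c ++ R).sum

theorem sweep_step (v R : List Int) (j c : Nat) (B0 : Int) :
    (if c < v.length then
      if (botAt v R j c).length < j then
        (insLt (v.getD c 0) (botAt v R j c), (botAt v R j c).sum + v.getD c 0,
         totAt v R c + v.getD c 0,
         max B0 (totAt v R c + v.getD c 0 - ((botAt v R j c).sum + v.getD c 0)))
      else if 0 < j ∧ v.getD c 0 < (botAt v R j c).getD ((botAt v R j c).length - 1) 0 then
        (insLt (v.getD c 0) (botAt v R j c).dropLast,
         (botAt v R j c).sum + v.getD c 0 - (botAt v R j c).getD ((botAt v R j c).length - 1) 0,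
         totAt v R c + v.getD c 0,
         max B0 (totAt v R c + v.getD c 0 -
           ((botAt v R j c).sum + v.getD c 0 - (botAt v R j c).getD ((botAt v R j c).length - 1) 0)))
      else (botAt v R j c, (botAt v R j c).sum, totAt v R c + v.getD c 0,
            max B0 (totAt v R c + v.getD c 0 - (botAt v R j c).sum))
    else (botAt v R j c, (botAt v R j c).sum, totAt v R c, max B0 (totAt v R c - (botAt v R j c).sum)))
    = (botAt v R j (c + 1), (botAt v R j (c + 1)).sum, totAt v R (c + 1),
       max B0 (totAt v R (c + 1) - (botAt v R j (c + 1)).sum)) := by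
  by_cases hc : c < v.length
  · rw [if_pos hc]
    have hx : v.getD c 0 = v[c] := List.getD_eq_getElem v 0 hc
    have htake : v.take (c + 1) = v.take c ++ [v[c]] := by
      rw [List.take_succ, List.getElem?_eq_getElem hc]
      rfl
    have hsort : PySem.List.sorted (v.take (c + 1) ++ R) (fun y => y) false
        = insLt v[c] (PySem.List.sorted (v.take c ++ R) (fun y => y) false) := by
      rw [htake, List.append_assoc, List.singleton_append]
      exact sorted_cons_mid _ _ _
    have htot1 : totAt v R (c + 1) = totAt v R c + v[c] := by
      unfold totAt
      rw [htake, List.append_assoc, List.singleton_append]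
      simp
      ring
    have hpair : (PySem.List.sorted (v.take c ++ R) (fun y => y) false).Pairwise (· ≤ ·) := by
      simpa using PySem.List.sorted_pairwise (v.take c ++ R) (fun y => y)
    by_cases hlen : (PySem.List.sorted (v.take c ++ R) (fun y => y) false).length < j
    · -- fewer than j cards so far: x joins the bottom unconditionally
      rw [if_pos (show (botAt v R j c).length < j by
        unfold botAt; rw [List.length_take]; omega)]
      have hbL : botAt v R j c = PySem.List.sorted (v.take c ++ R) (fun y => y) false := by
        unfold botAt
        exact List.take_of_length_le (by omega)
      have hb1 : botAt v R j (c + 1) = insLt v[c] (botAt v R j c) := by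
        unfold botAt
        rw [hsort, take_insLt_small _ _ _ (by omega),
          List.take_of_length_le (le_of_lt hlen)]
      refine Prod.ext ?_ (Prod.ext ?_ (Prod.ext ?_ ?_)) <;> simp only
      · rw [hb1, hx]
      · rw [hb1, sum_insLt, hx]; ring
      · rw [htot1, hx]
      · rw [hb1, sum_insLt, htot1, hx]; ring_nf
    · have hjL : j ≤ (PySem.List.sorted (v.take c ++ R) (fun y => y) false).length := by omega
      have hblen : (botAt v R j c).length = j := by
        unfold botAt; rw [List.length_take]; omega
      rw [if_neg (show ¬ (botAt v R j c).length < j by omega)]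
      have hgd : ∀ (hj0 : 0 < j), (botAt v R j c).getD ((botAt v R j c).length - 1) 0
          = (PySem.List.sorted (v.take c ++ R) (fun y => y) false)[j - 1]'(by omega) := by
        intro hj0
        rw [hblen, List.getD_eq_getElem _ 0 (by rw [hblen]; omega)]
        unfold botAt
        rw [List.getElem_take]
      by_cases hcond : 0 < j ∧ v.getD c 0 < (botAt v R j c).getD ((botAt v R j c).length - 1) 0
      · -- x displaces the current j-th smallest
        rw [if_pos hcond]
        obtain ⟨hj0, hlt⟩ := hcond
        rw [hgd hj0] at hlt
        rw [hx] at hlt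
        have hdl : (botAt v R j c).dropLast
            = (PySem.List.sorted (v.take c ++ R) (fun y => y) false).take (j - 1) := by
          unfold botAt
          rw [List.dropLast_eq_take, List.length_take, List.take_take]
          congr 1
          omega
        have hb1 : botAt v R j (c + 1) = insLt v[c] (botAt v R j c).dropLast := by
          rw [hdl]
          unfold botAt
          rw [hsort]
          exact take_insLt_lt _ _ j hpair (by omega) (by omega) hlt
        have hsplit : (botAt v R j c).sum
            = ((PySem.List.sorted (v.take c ++ R) (fun y => y) false).take (j - 1)).sum
              + (PySem.List.sorted (v.take c ++ R) (fun y => y) false)[j - 1]'(by omega) := by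
          have h1 : botAt v R j c
              = (PySem.List.sorted (v.take c ++ R) (fun y => y) false).take ((j - 1) + 1) := by
            unfold botAt
            congr 1
            omega
          rw [h1, sum_take_succ _ _ (by omega)]
        refine Prod.ext ?_ (Prod.ext ?_ (Prod.ext ?_ ?_)) <;> simp only
        · rw [hb1, hx]
        · rw [hb1, sum_insLt, hdl, hgd hj0, hsplit, hx]; ring
        · rw [htot1, hx]
        · rw [hb1, sum_insLt, hdl, hgd hj0, htot1, hsplit, hx]; ring_nf
      · -- x does not enter the bottom
        rw [if_neg hcond]
        have hb1 : botAt v R j (c + 1) = botAt v R j c := by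
          unfold botAt
          rw [hsort]
          rcases Nat.eq_zero_or_pos j with hj0 | hj0
          · subst hj0; simp
          · have hge : (PySem.List.sorted (v.take c ++ R) (fun y => y) false)[j - 1]'(by omega)
                ≤ v[c] := by
              have := hgd hj0
              by_contra hcon
              exact hcond ⟨hj0, by rw [this, hx]; omega⟩
            exact take_insLt_ge _ _ j hpair hjL hj0 hge
        refine Prod.ext ?_ (Prod.ext ?_ (Prod.ext ?_ ?_)) <;> simp only
        · rw [hb1]
        · rw [hb1]
        · rw [htot1, hx]
        · rw [hb1, htot1, hx]
  · rw [if_neg hc]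
    have ht : v.take (c + 1) = v.take c := by
      rw [List.take_of_length_le (by omega), List.take_of_length_le (by omega)]
    have hb : botAt v R j (c + 1) = botAt v R j c := by unfold botAt; rw [ht]
    have htt : totAt v R (c + 1) = totAt v R c := by unfold totAt; rw [ht]
    rw [hb, htt]

theorem sweep_inv (v R : List Int) (j : Nat) : ∀ (I : Nat) (b : Int),
    (List.range I).foldl
      (fun (st : List Int × Int × Int × Int) u =>
        if u < v.length then
          if st.1.length < j then
            (insLt (v.getD u 0) st.1, st.2.1 + v.getD u 0, st.2.2.1 + v.getD u 0,
             max st.2.2.2 (st.2.2.1 + v.getD u 0 - (st.2.1 + v.getD u 0)))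
          else if 0 < j ∧ v.getD u 0 < st.1.getD (st.1.length - 1) 0 then
            (insLt (v.getD u 0) st.1.dropLast,
             st.2.1 + v.getD u 0 - st.1.getD (st.1.length - 1) 0,
             st.2.2.1 + v.getD u 0,
             max st.2.2.2 (st.2.2.1 + v.getD u 0 - (st.2.1 + v.getD u 0 - st.1.getD (st.1.length - 1) 0)))
          else (st.1, st.2.1, st.2.2.1 + v.getD u 0, max st.2.2.2 (st.2.2.1 + v.getD u 0 - st.2.1))
        else (st.1, st.2.1, st.2.2.1, max st.2.2.2 (st.2.2.1 - st.2.1)))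
      (botAt v R j 0, (botAt v R j 0).sum, totAt v R 0,
       max b (totAt v R 0 - (botAt v R j 0).sum))
    = (botAt v R j I, (botAt v R j I).sum, totAt v R I,
       (List.range (I + 1)).foldl (fun a c => max a (totAt v R c - (botAt v R j c).sum)) b) := by
  intro I
  induction I with
  | zero => intro b; simp
  | succ I ih =>
    intro b
    rw [List.range_succ, List.foldl_append, ih b]
    simp only [List.foldl_cons, List.foldl_nil]
    rw [sweep_step v R j I _]
    rw [List.range_succ (n := I + 1), List.foldl_append]
    simp only [List.foldl_cons, List.foldl_nil]

def cellA (n : Int) (v : List Int) (i j : Nat) : Int :=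
  ((PySem.List.sorted (v.take i ++ PySem.List.slice v (some (n - (j : Int))) none)
      (fun y => y) false).drop j).sum

theorem val_eq_cell (n : Int) (v : List Int) (j c : Nat) :
    totAt v (PySem.List.slice v (some (n - (j : Int))) none) c
      - (botAt v (PySem.List.slice v (some (n - (j : Int))) none) j c).sum
    = cellA n v c j := by
  unfold cellA botAt totAt
  rw [sum_drop_eq]
  have hs : (PySem.List.sorted (v.take c ++ PySem.List.slice v (some (n - (j : Int))) none)
        (fun y => y) false).sum
      = (v.take c ++ PySem.List.slice v (some (n - (j : Int))) none).sum :=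
    (PySem.List.sorted_perm _ _ _).sum_eq
  omega

theorem foldl_pairs_fst (F : Int → Nat × Nat → Int) :
    ∀ (li lj : List Nat) (init : Int),
    li.foldl (fun acc i => lj.foldl (fun a j => F a (i, j)) acc) init
      = (li.flatMap (fun i => lj.map (fun j => (i, j)))).foldl F init := by
  intro li lj
  induction li with
  | nil => intro init; rfl
  | cons y t ih =>
    intro init
    simp only [List.foldl_cons, List.flatMap_cons, List.foldl_append, List.foldl_map]
    rw [ih]

theorem foldl_pairs_snd (F : Int → Nat × Nat → Int) :
    ∀ (lj li : List Nat) (init : Int),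
    lj.foldl (fun acc j => li.foldl (fun a i => F a (i, j)) acc) init
      = (lj.flatMap (fun j => li.map (fun i => (i, j)))).foldl F init := by
  intro lj li
  induction lj with
  | nil => intro init; rfl
  | cons y t ih =>
    intro init
    simp only [List.foldl_cons, List.flatMap_cons, List.foldl_append, List.foldl_map]
    rw [ih]

theorem pairs_perm (A B : Nat) :
    ((List.range A).flatMap (fun i => (List.range B).map (fun j => (i, j)))).Perm
      ((List.range B).flatMap (fun j => (List.range A).map (fun i => (i, j)))) := by
  refine (List.perm_ext_iff_of_nodup ?_ ?_).mpr ?_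
  · exact List.Nodup.product List.nodup_range List.nodup_range
  · have h : (List.range B).flatMap (fun j => (List.range A).map (fun i => (i, j)))
        = ((List.range B).flatMap (fun j => (List.range A).map (fun i => (j, i)))).map
            Prod.swap := by
      rw [List.map_flatMap]
      simp [List.map_map, Function.comp_def]
    rw [h]
    exact (List.Nodup.product List.nodup_range List.nodup_range).map
      (fun p q hpq => by simpa using congrArg Prod.swap hpq)
  · intro p
    rcases p with ⟨i, j⟩
    simp only [List.mem_flatMap, List.mem_map, List.mem_range, Prod.mk.injEq]
    constructor
    · rintro ⟨a, ha, b, hb, h1, h2⟩; exact ⟨j, by omega, i, by omega, rfl, rfl⟩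
    · rintro ⟨a, ha, b, hb, h1, h2⟩; exact ⟨i, by omega, j, by omega, rfl, rfl⟩

theorem grid_swap (g : Nat → Nat → Int) (K A B : Nat) (init : Int) :
    (List.range A).foldl (fun acc i =>
      (List.range B).foldl (fun a j => if K < i + j then a else max a (g i j)) acc) init
    = (List.range B).foldl (fun acc j =>
        (List.range A).foldl (fun a i => if K < i + j then a else max a (g i j)) acc) init := by
  rw [foldl_pairs_fst (fun a p => if K < p.1 + p.2 then a else max a (g p.1 p.2)),
      foldl_pairs_snd (fun a p => if K < p.1 + p.2 then a else max a (g p.1 p.2))]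
  have hcomm : ∀ (z : Int) (x y : Nat × Nat),
      (if K < y.1 + y.2 then (if K < x.1 + x.2 then z else max z (g x.1 x.2))
       else max (if K < x.1 + x.2 then z else max z (g x.1 x.2)) (g y.1 y.2))
      = (if K < x.1 + x.2 then (if K < y.1 + y.2 then z else max z (g y.1 y.2))
         else max (if K < y.1 + y.2 then z else max z (g y.1 y.2)) (g x.1 x.2)) := by
    intro z x y
    split_ifs <;> first | rfl | apply max_right_comm
  exact List.Perm.foldl_eq (rcomm := ⟨fun z x y => hcomm z x y⟩) (pairs_perm A B) init

theorem pyGetD_neg_one_eq (l : List Int) :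
    PySem.List.pyGetD l (-1) 0 = l.getD (l.length - 1) 0 := by
  cases l with
  | nil => simp [PySem.List.pyGetD, PySem.List.pyGet?, PySem.List.pyIdx?, List.getD]
  | cons y t =>
    simp [PySem.List.pyGetD, PySem.List.pyGet?, PySem.List.pyIdx?, List.getD]

theorem A_eq (v : List Int) (N K : Nat) :
    solve (N : Int) (K : Int) v
      = (List.range (min N K + 1)).foldl (fun ans i =>
          (List.range (min N K + 1)).foldl (fun a j =>
            if K < i + j then a else max a (cellA (N : Int) v i j)) ans) 0 := by
  unfold solve
  have hmin : min ((N : Int) + 1) ((K : Int) + 1) = ((min N K + 1 : Nat) : Int) := by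
    push_cast; omega
  rw [hmin, PySem.List.pyRange_zero_natCast, List.foldl_map]
  apply PySem.List.foldl_congr_mem
  intro ans i hi
  rw [List.foldl_map]
  apply PySem.List.foldl_congr_mem
  intro a j hj
  have hcond : ((K : Int) < (i : Int) + (j : Int)) ↔ (K < i + j) := by omega
  simp only [gt_iff_lt, hcond, PySem.List.slice_to_natCast, PySem.List.slice_from_natCast,
    cellA]

theorem B_eq (v : List Int) (N K : Nat) :
    solve_alt (N : Int) (K : Int) v
      = (List.range (min N K + 1)).foldl (fun best j =>
          (List.range (min (min N K) (K - j) + 1)).foldl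
            (fun a i => max a (cellA (N : Int) v i j)) best) 0 := by
  simp only [solve_alt]
  have hm : min (N : Int) (K : Int) = ((min N K : Nat) : Int) := (Nat.cast_min N K).symm
  simp only [hm]
  have hmp1 : ((min N K : Nat) : Int) + 1 = ((min N K + 1 : Nat) : Int) := by push_cast; ring
  rw [hmp1, PySem.List.pyRange_zero_natCast, List.foldl_map]
  apply PySem.List.foldl_congr_mem
  intro best j hj
  simp only [List.mem_range] at hj
  have hb0 : PySem.List.slice
        (PySem.List.sorted (PySem.List.slice v (some ((N : Int) - (j : Int))) none)
          (fun x => x) false) none (some (j : Int))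
      = botAt v (PySem.List.slice v (some ((N : Int) - (j : Int))) none) j 0 := by
    rw [PySem.List.slice_to_natCast]
    unfold botAt
    rw [List.take_zero, List.nil_append]
  have ht0 : (PySem.List.slice v (some ((N : Int) - (j : Int))) none).sum
      = totAt v (PySem.List.slice v (some ((N : Int) - (j : Int))) none) 0 := by
    unfold totAt
    rw [List.take_zero, List.nil_append]
  have hmin2 : min ((min N K : Nat) : Int) ((K : Int) - (j : Int))
      = ((min (min N K) (K - j) : Nat) : Int) := by
    rw [Nat.cast_min]
    congr 1
    omega
  rw [hb0, ht0, hmin2]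
  have hr2 : PySem.List.pyRange 1 (((min (min N K) (K - j) : Nat) : Int) + 1) 1
      = (List.range (min (min N K) (K - j))).map (fun u : Nat => (1 : Int) + (u : Int)) := by
    rw [PySem.List.pyRange_one]
    have h : (((min (min N K) (K - j) : Nat) : Int) + 1 - 1).toNat = min (min N K) (K - j) := by
      omega
    rw [h]
  rw [hr2, List.foldl_map]
  have hstepf : ∀ (st : List Int × Int × Int × Int) (u : Nat),
      u ∈ List.range (min (min N K) (K - j)) →
      (if (1 : Int) + (u : Int) - 1 < (v.length : Int) then
        if (st.1.length : Int) < (j : Int) then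
          (insLt (PySem.List.pyGetD v ((1 : Int) + (u : Int) - 1) 0) st.1,
           st.2.1 + PySem.List.pyGetD v ((1 : Int) + (u : Int) - 1) 0,
           st.2.2.1 + PySem.List.pyGetD v ((1 : Int) + (u : Int) - 1) 0,
           max st.2.2.2 (st.2.2.1 + PySem.List.pyGetD v ((1 : Int) + (u : Int) - 1) 0
             - (st.2.1 + PySem.List.pyGetD v ((1 : Int) + (u : Int) - 1) 0)))
        else if (j : Int) > 0 ∧ PySem.List.pyGetD v ((1 : Int) + (u : Int) - 1) 0
            < PySem.List.pyGetD st.1 (-1) 0 then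
          (insLt (PySem.List.pyGetD v ((1 : Int) + (u : Int) - 1) 0)
             (PySem.List.slice st.1 none (some (-1))),
           st.2.1 + PySem.List.pyGetD v ((1 : Int) + (u : Int) - 1) 0
             - PySem.List.pyGetD st.1 (-1) 0,
           st.2.2.1 + PySem.List.pyGetD v ((1 : Int) + (u : Int) - 1) 0,
           max st.2.2.2 (st.2.2.1 + PySem.List.pyGetD v ((1 : Int) + (u : Int) - 1) 0
             - (st.2.1 + PySem.List.pyGetD v ((1 : Int) + (u : Int) - 1) 0
                - PySem.List.pyGetD st.1 (-1) 0)))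
        else (st.1, st.2.1, st.2.2.1 + PySem.List.pyGetD v ((1 : Int) + (u : Int) - 1) 0,
              max st.2.2.2 (st.2.2.1 + PySem.List.pyGetD v ((1 : Int) + (u : Int) - 1) 0 - st.2.1))
      else (st.1, st.2.1, st.2.2.1, max st.2.2.2 (st.2.2.1 - st.2.1)))
      = (if u < v.length then
          if st.1.length < j then
            (insLt (v.getD u 0) st.1, st.2.1 + v.getD u 0, st.2.2.1 + v.getD u 0,
             max st.2.2.2 (st.2.2.1 + v.getD u 0 - (st.2.1 + v.getD u 0)))
          else if 0 < j ∧ v.getD u 0 < st.1.getD (st.1.length - 1) 0 then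
            (insLt (v.getD u 0) st.1.dropLast,
             st.2.1 + v.getD u 0 - st.1.getD (st.1.length - 1) 0,
             st.2.2.1 + v.getD u 0,
             max st.2.2.2 (st.2.2.1 + v.getD u 0 - (st.2.1 + v.getD u 0 - st.1.getD (st.1.length - 1) 0)))
          else (st.1, st.2.1, st.2.2.1 + v.getD u 0, max st.2.2.2 (st.2.2.1 + v.getD u 0 - st.2.1))
        else (st.1, st.2.1, st.2.2.1, max st.2.2.2 (st.2.2.1 - st.2.1))) := by
    intro st u hu
    have h1u : (1 : Int) + (u : Int) - 1 = ((u : Nat) : Int) := by push_cast; ring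
    have hclt : ((u : Nat) : Int) < (v.length : Int) ↔ u < v.length := Nat.cast_lt
    have hblt : ((st.1.length : Nat) : Int) < ((j : Nat) : Int) ↔ st.1.length < j := Nat.cast_lt
    have hjpos : ((j : Nat) : Int) > 0 ↔ 0 < j := by omega
    rw [h1u, PySem.List.pyGetD_natCast, pyGetD_neg_one_eq, PySem.List.slice_to_neg_one]
    simp only [hclt, hblt, hjpos]
  rw [PySem.List.foldl_congr_mem _ _ _ _ hstepf,
    sweep_inv v (PySem.List.slice v (some ((N : Int) - (j : Int))) none) j
      (min (min N K) (K - j)) best]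
  simp only
  apply PySem.List.foldl_congr_mem
  intro a c hc
  rw [val_eq_cell]

theorem grid_eq (v : List Int) (N K : Nat) :
    (List.range (min N K + 1)).foldl (fun ans i =>
      (List.range (min N K + 1)).foldl (fun a j =>
        if K < i + j then a else max a (cellA (N : Int) v i j)) ans) 0
    = (List.range (min N K + 1)).foldl (fun best j =>
        (List.range (min (min N K) (K - j) + 1)).foldl
          (fun a i => max a (cellA (N : Int) v i j)) best) 0 := by
  rw [grid_swap (fun i j => cellA (N : Int) v i j) K (min N K + 1) (min N K + 1) 0]
  apply PySem.List.foldl_congr_mem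
  intro best j hj
  simp only [List.mem_range] at hj
  have hcg : ∀ (a : Int) (i : Nat), i ∈ List.range (min N K + 1) →
      (if K < i + j then a else max a (cellA (N : Int) v i j))
        = (if K - j < i then a else max a (cellA (N : Int) v i j)) := by
    intro a i hi
    have hiff : (K < i + j) ↔ (K - j < i) := by omega
    simp only [hiff]
  rw [PySem.List.foldl_congr_mem _ _ _ _ hcg, foldl_if_gt]

theorem solve_trivial (n k : Int) (v : List Int)
    (h1 : min (n + 1) (k + 1) ≤ 0) (h2 : min n k + 1 ≤ 0) :
    solve n k v = solve_alt n k v := by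
  simp only [solve, solve_alt, PySem.List.pyRange_one_eq_nil h1,
    PySem.List.pyRange_one_eq_nil h2, List.foldl_nil]

theorem solve_eq_all (n k : Int) (v : List Int) : solve n k v = solve_alt n k v := by
  by_cases hn : 0 ≤ n
  · by_cases hk : 0 ≤ k
    · obtain ⟨N, rfl⟩ := Int.eq_ofNat_of_zero_le hn
      obtain ⟨K, rfl⟩ := Int.eq_ofNat_of_zero_le hk
      rw [A_eq, grid_eq, ← B_eq]
    · exact solve_trivial n k v (le_trans (min_le_right _ _) (by omega))
        (by have := min_le_right n k; omega)
  · exact solve_trivial n k v (le_trans (min_le_left _ _) (by omega))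
      (by have := min_le_left n k; omega)

-- ===== VERDICT (by name: the statement is the Claim_ definition above) =====
theorem solve_spec : Claim_equal_solve := by
  unfold Claim_equal_solve
  intro n k v _
  unfold Spec_solve
  exact solve_eq_all n k v
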